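-- pv_equiv track=rewrite | github.com/TiagoDM-21905643/AdventOfCode | _2020/Day09/_encoding_error.py | get_largest_number
-- ===== SOURCE A (Python) =====
-- def get_largest_number(numbers, target_num):
--     largest_num = 0
--     sum_ = 0
--     for num in numbers:
--         sum_ += num
--         if num > largest_num:
--             largest_num = num
--         if sum_ == target_num:
--             break
--     return largest_num
-- ===== SOURCE B (Python) =====
-- from itertools import accumulate
--
-- def get_largest_number(numbers, target_num):
--     sums = list(accumulate(numbers))
--     try:
--         i = sums.index(target_num)
--         sel = numbers[:i + 1]
--     except ValueError:
--         sel = numbers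
--     return max([0] + sel)
-- ===== Notes on version B (the rewrite author's own statement) =====
-- stated objective: alternative
-- what changed: Replaces A's single interleaved running-sum/running-max/break loop with a two-phase computation: build the cumulative-sum list, locate the first index equal to target to choose the relevant prefix, then take max([0] + prefix).
import Mathlib
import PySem

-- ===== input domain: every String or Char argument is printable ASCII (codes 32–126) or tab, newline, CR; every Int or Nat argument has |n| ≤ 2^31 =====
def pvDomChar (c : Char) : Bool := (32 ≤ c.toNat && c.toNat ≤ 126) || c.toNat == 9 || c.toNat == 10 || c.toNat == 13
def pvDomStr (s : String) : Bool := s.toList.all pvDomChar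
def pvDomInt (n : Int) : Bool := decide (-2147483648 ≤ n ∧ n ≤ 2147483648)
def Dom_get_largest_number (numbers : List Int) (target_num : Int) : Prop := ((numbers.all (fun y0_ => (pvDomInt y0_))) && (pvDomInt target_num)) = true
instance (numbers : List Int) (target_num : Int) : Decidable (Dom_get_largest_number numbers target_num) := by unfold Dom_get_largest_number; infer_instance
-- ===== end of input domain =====

-- B replaces A's interleaved running-sum/max/break loop with a two-phase computation (cumulative sums, locate cutoff, then max of the prefix); alternative decomposition, same cost.


-- ===== PORT A =====
-- loop of A: state (largest_num, sum_); break transliterated as early return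
def goA : List Int → Int → Int → Int → Int
  | [], _, largest, _ => largest
  | n :: rest, t, largest, s =>
    let s' := s + n
    let largest' := if n > largest then n else largest
    if s' = t then largest' else goA rest t largest' s'

def get_largest_number (numbers : List Int) (target_num : Int) : Int :=
  goA numbers target_num 0 0

-- ===== PORT B =====
-- itertools.accumulate
def pyAccum : List Int → Int → List Int
  | [], _ => []
  | n :: rest, s => (s + n) :: pyAccum rest (s + n)

def get_largest_number_alt (numbers : List Int) (target_num : Int) : Int :=
  let sums := pyAccum numbers 0
  let sel := match PySem.List.index? sums target_num with
    | some i => numbers.take (i + 1)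
    | none => numbers
  List.foldl max 0 sel

-- ===== PRECONDITION & SPEC =====
def Spec_get_largest_number (numbers : List Int) (target_num : Int) (out : Int) : Prop := out = get_largest_number_alt numbers target_num
instance (numbers : List Int) (target_num : Int) (out : Int) : Decidable (Spec_get_largest_number numbers target_num out) := by unfold Spec_get_largest_number; infer_instance

-- ===== CLAIM (what is proved, stated in full; the proofs are below) =====
def Claim_equal_get_largest_number : Prop := ∀ (numbers : List Int) (target_num : Int), Dom_get_largest_number numbers target_num → Spec_get_largest_number numbers target_num (get_largest_number numbers target_num)

-- ===== LEMMAS AND PROOFS =====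

-- ===== VERDICT (by name: the statement is the Claim_ definition above) =====
-- the selected prefix, parametrised by the running sum s
def selFrom (nums : List Int) (t s : Int) : List Int :=
  match PySem.List.index? (pyAccum nums s) t with
  | some i => nums.take (i + 1)
  | none => nums

theorem goA_eq_foldl (nums : List Int) (t : Int) :
    ∀ largest s, goA nums t largest s = List.foldl max largest (selFrom nums t s) := by
  induction nums with
  | nil => intro largest s; simp [goA, selFrom, pyAccum, PySem.List.index?]
  | cons n rest ih =>
    intro largest s
    by_cases h : s + n = t
    · have hidx : PySem.List.index? (pyAccum (n :: rest) s) t = some 0 := by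
        simp only [pyAccum, h]
        exact PySem.List.index?_cons_self t (pyAccum rest t)
      simp only [selFrom, hidx, goA, h, if_pos rfl, List.take, List.foldl_cons,
        List.foldl_nil, max_def]
      split_ifs <;> omega
    · have hsel : selFrom (n :: rest) t s = n :: selFrom rest t (s + n) := by
        simp only [selFrom, pyAccum, PySem.List.index?_cons_of_ne _ h]
        cases PySem.List.index? (pyAccum rest (s + n)) t <;> simp
      rw [hsel]
      simp only [goA, h, if_false, List.foldl_cons]
      rw [ih]
      congr 1
      simp only [max_def]; split_ifs <;> omega

theorem get_largest_number_spec : Claim_equal_get_largest_number := by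
  intro numbers target_num _
  unfold Spec_get_largest_number get_largest_number get_largest_number_alt
  rw [goA_eq_foldl]
  rfl
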